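-- pv_equiv track=rewrite | github.com/reutDayan1/turbo-fishstick | hill_climbing.py | the_best_neighbor
-- ===== SOURCE A (Python) =====
-- def enemy_cost1(queens:list):
--     """
--     :param queens:list that describes the location of the queens
--     :return:The number of threats on the board
--     """
--     count = 0
--     for i in range(len(queens)):
--         for j in range(i+1,len(queens)):
--             if (queens[i] == queens[j]) or (abs(queens[i]-queens[j]) == abs(j-i)):
--                 count += 1
--     return count
--
-- def min_enemy(current: list, i):
--     """
--     :param current:list that describes the location of the queens
--     :return:the board with the min enemy
--     """
--     min_current = current[:]
--     number_of_enemy = enemy_cost1(min_current)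
--     for j in range(len(current)):
--         copy_current = current[:]
--         if current[i] != j:
--             copy_current[i] = j
--             c = enemy_cost1(copy_current)
--             if c < number_of_enemy:
--                 number_of_enemy = c
--                 min_current = copy_current
--     return min_current
--
-- def the_best_neighbor(current):
--     """
--     :param current:list that describes the location of the queens
--     :return:the best neighbor
--     """
--     min_current = []
--     min_enemy1 = float('inf')
--     for i in range(len(current)):
--         c = min_enemy(current, i)
--         if enemy_cost1(c) < min_enemy1:
--             min_current = c[:]
--             min_enemy1 = enemy_cost1(c)
--             if min_enemy1 == 0:
--                 return min_current
--     return min_current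
-- ===== SOURCE B (Python) =====
-- def _cost(queens):
--     # total number of attacking pairs, O(n^2), computed once
--     n = len(queens)
--     total = 0
--     for p in range(n):
--         for q in range(p + 1, n):
--             if queens[p] == queens[q] or abs(queens[p] - queens[q]) == abs(q - p):
--                 total += 1
--     return total
--
--
-- def _conf(queens, i):
--     # number of queens (other than i) attacking queen i
--     c = 0
--     for k in range(len(queens)):
--         if k != i and (queens[k] == queens[i] or abs(queens[k] - queens[i]) == abs(k - i)):
--             c += 1
--     return c
--
--
-- def _conf_at(queens, i, row):
--     # number of queens (other than i) that would attack a queen placed at (row, column i)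
--     c = 0
--     for k in range(len(queens)):
--         if k != i and (queens[k] == row or abs(queens[k] - row) == abs(k - i)):
--             c += 1
--     return c
--
--
-- def the_best_neighbor(current):
--     n = len(current)
--     base = _cost(current)
--     best, best_cost = list(current), base
--     for i in range(n):
--         old = _conf(current, i)
--         for j in range(n):
--             if j != current[i]:
--                 # cost of the board with queen i moved to row j, by an O(n) delta
--                 c = base - old + _conf_at(current, i, j)
--                 if c < best_cost:
--                     best = current[:i] + [j] + current[i + 1:]
--                     best_cost = c
--                     if c == 0:
--                         return best
--     return best
-- ===== Notes on version B (the rewrite author's own statement) =====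
-- stated objective: faster
-- what changed: B computes the board cost once and evaluates each candidate move by an O(n) conflict delta in a single flat scan, instead of A's per-column best-board search that recomputes the full O(n^2) pairwise cost for every candidate board.
import Mathlib
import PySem

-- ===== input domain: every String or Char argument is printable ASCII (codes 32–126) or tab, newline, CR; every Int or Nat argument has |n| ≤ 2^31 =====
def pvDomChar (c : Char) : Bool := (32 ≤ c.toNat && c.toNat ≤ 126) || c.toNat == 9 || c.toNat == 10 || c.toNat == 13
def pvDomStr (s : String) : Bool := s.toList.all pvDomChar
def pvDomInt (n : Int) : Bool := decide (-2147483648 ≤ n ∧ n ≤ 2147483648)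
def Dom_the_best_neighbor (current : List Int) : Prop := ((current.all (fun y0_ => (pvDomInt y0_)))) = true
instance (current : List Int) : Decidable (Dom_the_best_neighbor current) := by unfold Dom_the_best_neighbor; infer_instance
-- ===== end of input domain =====

-- B computes the board cost once and scores each candidate move by an O(n) conflict delta
-- (one flat scan, O(n^3) total) instead of A's recomputation of the full O(n^2) pairwise
-- cost for every candidate board (O(n^4) total); objective: faster.

-- ===== PORT A =====
-- helper: enemy_cost1(queens) — number of attacking pairs
def enemy_cost1 (queens : List Int) : Int :=
  (PySem.List.pyRange 0 (PySem.List.len queens) 1).foldl (fun count i =>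
    (PySem.List.pyRange (i + 1) (PySem.List.len queens) 1).foldl (fun count j =>
      if PySem.List.pyGetD queens i 0 = PySem.List.pyGetD queens j 0 ∨
         (PySem.List.pyGetD queens i 0 - PySem.List.pyGetD queens j 0).natAbs = (j - i).natAbs
      then count + 1 else count) count) 0

-- helper: min_enemy(current, i) — best board obtained by moving queen i (strict improvement only)
def min_enemy (current : List Int) (i : Int) : List Int :=
  ((PySem.List.pyRange 0 (PySem.List.len current) 1).foldl (fun (st : List Int × Int) j =>
      if PySem.List.pyGetD current i 0 ≠ j then
        let copy := PySem.List.pySetD current i j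
        let c := enemy_cost1 copy
        if c < st.2 then (copy, c) else st
      else st)
    (current, enemy_cost1 current)).1

-- the main loop of the_best_neighbor; m? = none models min_enemy1 = float('inf')
def tbnLoop (current : List Int) : List Int → List Int → Option Int → List Int
  | [], minCur, _ => minCur
  | i :: rest, minCur, m? =>
    let c := min_enemy current i
    if (match m? with | none => true | some m => decide (enemy_cost1 c < m)) = true then
      if enemy_cost1 c = 0 then c
      else tbnLoop current rest c (some (enemy_cost1 c))
    else tbnLoop current rest minCur m?

def the_best_neighbor (current : List Int) : List Int :=
  tbnLoop current (PySem.List.pyRange 0 (PySem.List.len current) 1) [] none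

-- ===== PORT B =====
-- helper: _cost(queens) — total number of attacking pairs, computed once
def alt_cost (queens : List Int) : Int :=
  (PySem.List.pyRange 0 (PySem.List.len queens) 1).foldl (fun total p =>
    (PySem.List.pyRange (p + 1) (PySem.List.len queens) 1).foldl (fun total q =>
      if PySem.List.pyGetD queens p 0 = PySem.List.pyGetD queens q 0 ∨
         (PySem.List.pyGetD queens p 0 - PySem.List.pyGetD queens q 0).natAbs = (q - p).natAbs
      then total + 1 else total) total) 0

-- helper: _conf(queens, i) — number of queens (other than i) attacking queen i
def alt_conf (queens : List Int) (i : Int) : Int :=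
  (PySem.List.pyRange 0 (PySem.List.len queens) 1).foldl (fun c k =>
    if k ≠ i ∧ (PySem.List.pyGetD queens k 0 = PySem.List.pyGetD queens i 0 ∨
        (PySem.List.pyGetD queens k 0 - PySem.List.pyGetD queens i 0).natAbs = (k - i).natAbs)
    then c + 1 else c) 0

-- helper: _conf_at(queens, i, row) — attackers of a queen placed at (row, column i)
def alt_confAt (queens : List Int) (i row : Int) : Int :=
  (PySem.List.pyRange 0 (PySem.List.len queens) 1).foldl (fun c k =>
    if k ≠ i ∧ (PySem.List.pyGetD queens k 0 = row ∨
        (PySem.List.pyGetD queens k 0 - row).natAbs = (k - i).natAbs)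
    then c + 1 else c) 0

-- inner loop over candidate rows j; Sum.inl v = the early `return best` on cost 0
def altInner (current : List Int) (i base old : Int) :
    List Int → List Int × Int → (List Int) ⊕ (List Int × Int)
  | [], st => Sum.inr st
  | j :: rest, st =>
    if j ≠ PySem.List.pyGetD current i 0 then
      if base - old + alt_confAt current i j < st.2 then
        if base - old + alt_confAt current i j = 0 then
          Sum.inl (PySem.List.slice current none (some i) ++ [j] ++
            PySem.List.slice current (some (i + 1)) none)
        else altInner current i base old rest
          (PySem.List.slice current none (some i) ++ [j] ++
            PySem.List.slice current (some (i + 1)) none,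
           base - old + alt_confAt current i j)
      else altInner current i base old rest st
    else altInner current i base old rest st

-- outer loop over columns i
def altOuter (current : List Int) (base : Int) : List Int → List Int × Int → List Int
  | [], st => st.1
  | i :: rest, st =>
    match altInner current i base (alt_conf current i)
        (PySem.List.pyRange 0 (PySem.List.len current) 1) st with
    | Sum.inl v => v
    | Sum.inr st' => altOuter current base rest st'

def the_best_neighbor_alt (current : List Int) : List Int :=
  let base := alt_cost current
  altOuter current base (PySem.List.pyRange 0 (PySem.List.len current) 1) (current, base)

-- ===== PRECONDITION & SPEC =====
def Spec_the_best_neighbor (current : List Int) (out : List Int) : Prop := out = the_best_neighbor_alt current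
instance (current : List Int) (out : List Int) : Decidable (Spec_the_best_neighbor current out) := by unfold Spec_the_best_neighbor; infer_instance

-- ===== CLAIM (what is proved, stated in full; the proofs are below) =====
def Claim_equal_the_best_neighbor : Prop := ∀ (current : List Int), Dom_the_best_neighbor current → Spec_the_best_neighbor current (the_best_neighbor current)

-- ===== LEMMAS AND PROOFS =====

-- the 0/1 weight of the (ordered) pair of columns p, q on board qs
def pairW (qs : List Int) (p q : Int) : Int :=
  if PySem.List.pyGetD qs p 0 = PySem.List.pyGetD qs q 0 ∨
     (PySem.List.pyGetD qs p 0 - PySem.List.pyGetD qs q 0).natAbs = (q - p).natAbs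
  then 1 else 0

lemma pairW_symm (qs : List Int) (p q : Int) : pairW qs p q = pairW qs q p := by
  unfold pairW
  have h1 : (PySem.List.pyGetD qs p 0 - PySem.List.pyGetD qs q 0).natAbs
      = (PySem.List.pyGetD qs q 0 - PySem.List.pyGetD qs p 0).natAbs := by omega
  have h2 : (q - p).natAbs = (p - q).natAbs := by omega
  rw [h1, h2]
  simp [eq_comm]
lemma pairW_nonneg (qs : List Int) (p q : Int) : 0 ≤ pairW qs p q := by
  unfold pairW; split <;> norm_num

-- sum of a map over pyRange = Finset.Ico sum
lemma sum_map_pyRange (a b : Int) (g : Int → Int) :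
    ((PySem.List.pyRange a b 1).map g).sum = ∑ x ∈ Finset.Ico a b, g x := by
  rw [← List.sum_toFinset g (PySem.List.nodup_pyRange_one a b)]
  congr 1
  ext x
  simp [PySem.List.mem_pyRange_one]
-- foldl with a conditional +1 = sum of 0/1 weights
lemma foldl_ite_one (l : List Int) (p : Int → Prop) [DecidablePred p] (a : Int) :
    l.foldl (fun acc x => if p x then acc + 1 else acc) a
      = a + (l.map (fun x => if p x then (1:Int) else 0)).sum := by
  induction l generalizing a with
  | nil => simp
  | cons x xs ih => simp only [List.foldl_cons, List.map_cons, List.sum_cons, ih]; split <;> ring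

lemma cost_eq_sum (qs : List Int) :
    enemy_cost1 qs = ∑ p ∈ Finset.Ico 0 (PySem.List.len qs),
      ∑ q ∈ Finset.Ico (p + 1) (PySem.List.len qs), pairW qs p q := by
  unfold enemy_cost1
  have h1 : ∀ (count p : Int),
      (PySem.List.pyRange (p + 1) (PySem.List.len qs) 1).foldl (fun count j =>
        if PySem.List.pyGetD qs p 0 = PySem.List.pyGetD qs j 0 ∨
           (PySem.List.pyGetD qs p 0 - PySem.List.pyGetD qs j 0).natAbs = (j - p).natAbs
        then count + 1 else count) count
      = count + ∑ q ∈ Finset.Ico (p + 1) (PySem.List.len qs), pairW qs p q := by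
    intro count p
    rw [foldl_ite_one, sum_map_pyRange]
    simp only [pairW]
  calc _ = (PySem.List.pyRange 0 (PySem.List.len qs) 1).foldl
        (fun count p => count + ∑ q ∈ Finset.Ico (p + 1) (PySem.List.len qs), pairW qs p q) 0 :=
      PySem.List.foldl_congr_mem _ _ _ _ (fun count p _ => h1 count p)
    _ = 0 + ((PySem.List.pyRange 0 (PySem.List.len qs) 1).map
        (fun p => ∑ q ∈ Finset.Ico (p + 1) (PySem.List.len qs), pairW qs p q)).sum :=
      PySem.List.foldl_add _ _ _
    _ = _ := by rw [sum_map_pyRange, zero_add]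
lemma alt_cost_eq (qs : List Int) : alt_cost qs = enemy_cost1 qs := rfl

lemma conf_eq_sum (qs : List Int) (i : Int) :
    alt_conf qs i = ∑ k ∈ (Finset.Ico 0 (PySem.List.len qs)).erase i, pairW qs k i := by
  unfold alt_conf
  rw [foldl_ite_one, sum_map_pyRange, zero_add]
  rw [← Finset.filter_ne' (Finset.Ico 0 (PySem.List.len qs)) i, Finset.sum_filter]
  refine Finset.sum_congr rfl fun k _ => ?_
  by_cases hk : k = i
  · simp [hk]
  · have habs : (k - i).natAbs = (i - k).natAbs := by omega
    simp only [pairW, habs]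
    simp [hk]
lemma cost_nonneg (qs : List Int) : 0 ≤ enemy_cost1 qs := by
  rw [cost_eq_sum]
  exact Finset.sum_nonneg fun p _ => Finset.sum_nonneg fun q _ => pairW_nonneg qs p q

-- splitting the pair sum at column i (for any symmetric-enough weight)
lemma pair_sum_split (qs : List Int) (i : Int) (h0 : 0 ≤ i) (hn : i < PySem.List.len qs) :
    ∑ p ∈ Finset.Ico 0 (PySem.List.len qs), ∑ q ∈ Finset.Ico (p + 1) (PySem.List.len qs), pairW qs p q
      = (∑ p ∈ Finset.Ico 0 (PySem.List.len qs), ∑ q ∈ Finset.Ico (p + 1) (PySem.List.len qs),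
          (if p ≠ i ∧ q ≠ i then pairW qs p q else 0))
        + ∑ k ∈ (Finset.Ico 0 (PySem.List.len qs)).erase i, pairW qs k i := by
  set n := PySem.List.len qs with hnn
  have hsplit : ∀ p q : Int, pairW qs p q
      = (if p ≠ i ∧ q ≠ i then pairW qs p q else 0) + (if p = i ∨ q = i then pairW qs p q else 0) := by
    intro p q
    by_cases hp : p = i <;> by_cases hq : q = i <;> simp [hp, hq]
  have step1 : ∑ p ∈ Finset.Ico 0 n, ∑ q ∈ Finset.Ico (p + 1) n, pairW qs p q
      = (∑ p ∈ Finset.Ico 0 n, ∑ q ∈ Finset.Ico (p + 1) n, (if p ≠ i ∧ q ≠ i then pairW qs p q else 0))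
        + ∑ p ∈ Finset.Ico 0 n, ∑ q ∈ Finset.Ico (p + 1) n, (if p = i ∨ q = i then pairW qs p q else 0) := by
    rw [← Finset.sum_add_distrib]
    refine Finset.sum_congr rfl fun p _ => ?_
    rw [← Finset.sum_add_distrib]
    exact Finset.sum_congr rfl fun q _ => hsplit p q
  have hmem : i ∈ Finset.Ico 0 n := Finset.mem_Ico.mpr ⟨h0, hn⟩
  have step2 : ∑ p ∈ Finset.Ico 0 n, ∑ q ∈ Finset.Ico (p + 1) n, (if p = i ∨ q = i then pairW qs p q else 0)
      = ∑ k ∈ (Finset.Ico 0 n).erase i, pairW qs k i := by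
    have hinner : ∀ p : Int, ∑ q ∈ Finset.Ico (p + 1) n, (if p = i ∨ q = i then pairW qs p q else 0)
        = if p = i then ∑ q ∈ Finset.Ico (i + 1) n, pairW qs i q
          else (if i ∈ Finset.Ico (p + 1) n then pairW qs p i else 0) := by
      intro p
      by_cases hp : p = i
      · subst hp; simp
      · rw [if_neg hp]
        have : ∀ q ∈ Finset.Ico (p + 1) n, (if p = i ∨ q = i then pairW qs p q else 0)
            = if q = i then pairW qs p q else 0 := by
          intro q _; simp [hp]
        rw [Finset.sum_congr rfl this]
        by_cases hi : i ∈ Finset.Ico (p + 1) n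
        · rw [if_pos hi, Finset.sum_ite_eq_of_mem' _ _ _ hi]
        · rw [if_neg hi, Finset.sum_ite_of_false (by intro q hq hqi; exact hi (hqi ▸ hq)), Finset.sum_const_zero]
    rw [Finset.sum_congr rfl fun p _ => hinner p]
    rw [← Finset.add_sum_erase _ _ hmem, if_pos rfl]
    have herase : ∀ p ∈ (Finset.Ico 0 n).erase i,
        (if p = i then ∑ q ∈ Finset.Ico (i + 1) n, pairW qs i q
          else (if i ∈ Finset.Ico (p + 1) n then pairW qs p i else 0))
        = if p < i then pairW qs p i else 0 := by
      intro p hp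
      obtain ⟨hpi, hpm⟩ := Finset.mem_erase.mp hp
      rw [if_neg hpi]
      have : i ∈ Finset.Ico (p + 1) n ↔ p < i := by
        rw [Finset.mem_Ico]; omega
      by_cases hlt : p < i
      · rw [if_pos (this.mpr hlt), if_pos hlt]
      · rw [if_neg (fun h => hlt (this.mp h)), if_neg hlt]
    rw [Finset.sum_congr rfl herase]
    have hunion : (Finset.Ico 0 n).erase i = Finset.Ico 0 i ∪ Finset.Ico (i + 1) n := by
      ext x; simp only [Finset.mem_erase, Finset.mem_Ico, Finset.mem_union]; omega
    have hdisj : Disjoint (Finset.Ico 0 i) (Finset.Ico (i + 1) n) := by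
      simp only [Finset.disjoint_left, Finset.mem_Ico]; omega
    rw [hunion, Finset.sum_union hdisj, Finset.sum_union hdisj]
    have hL : ∑ p ∈ Finset.Ico 0 i, (if p < i then pairW qs p i else 0) = ∑ p ∈ Finset.Ico 0 i, pairW qs p i := by
      refine Finset.sum_congr rfl fun p hp => ?_
      rw [if_pos (Finset.mem_Ico.mp hp).2]
    have hR : ∑ p ∈ Finset.Ico (i + 1) n, (if p < i then pairW qs p i else 0) = 0 := by
      rw [Finset.sum_ite_of_false (by intro p hp h; have := (Finset.mem_Ico.mp hp).1; omega), Finset.sum_const_zero]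
    have hS1 : ∑ q ∈ Finset.Ico (i + 1) n, pairW qs i q = ∑ q ∈ Finset.Ico (i + 1) n, pairW qs q i :=
      Finset.sum_congr rfl fun q _ => pairW_symm qs i q
    rw [hL, hR, hS1]
    ring
  rw [step1, step2]
lemma len_set (qs : List Int) (m : Nat) (j : Int) :
    PySem.List.len (qs.set m j) = PySem.List.len qs := by
  simp [PySem.List.len_eq]

lemma getD_set_ne (qs : List Int) (i : Int) (j : Int) (p : Int)
    (h0 : 0 ≤ i) (hp0 : 0 ≤ p) (hpn : p < PySem.List.len qs) (hpi : p ≠ i) :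
    PySem.List.pyGetD (qs.set i.toNat j) p 0 = PySem.List.pyGetD qs p 0 := by
  have hplen : p < PySem.List.len (qs.set i.toNat j) := by
    simpa [PySem.List.len_eq] using hpn
  rw [PySem.List.pyGetD_eq_getElem _ 0 hp0 (by simpa [PySem.List.len_eq] using hplen), PySem.List.pyGetD_eq_getElem _ 0 hp0 (by simpa [PySem.List.len_eq] using hpn)]
  exact List.getElem_set_ne (by omega) _

lemma getD_set_self (qs : List Int) (i : Int) (j : Int)
    (h0 : 0 ≤ i) (hn : i < PySem.List.len qs) :
    PySem.List.pyGetD (qs.set i.toNat j) i 0 = j := by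
  have hilen : i < PySem.List.len (qs.set i.toNat j) := by
    simpa [PySem.List.len_eq] using hn
  rw [PySem.List.pyGetD_eq_getElem _ 0 h0 (by simpa [PySem.List.len_eq] using hilen)]
  exact List.getElem_set_self (by rw [PySem.List.len_eq] at hn; simp only [List.length_set]; omega)


-- entries off column i agree between qs and qs.set i.toNat j
lemma pairW_set_ne (qs : List Int) (i : Int) (j : Int) (p q : Int)
    (h0 : 0 ≤ i)
    (hp0 : 0 ≤ p) (hpn : p < PySem.List.len qs) (hq0 : 0 ≤ q) (hqn : q < PySem.List.len qs)
    (hp : p ≠ i) (hq : q ≠ i) :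
    pairW (qs.set i.toNat j) p q = pairW qs p q := by
  unfold pairW
  rw [getD_set_ne qs i j p h0 hp0 hpn hp, getD_set_ne qs i j q h0 hq0 hqn hq]
-- THE DELTA LEMMA: cost of the board with queen i moved to row j
lemma cost_set (qs : List Int) (i j : Int) (h0 : 0 ≤ i) (hn : i < PySem.List.len qs) :
    enemy_cost1 (qs.set i.toNat j)
      = enemy_cost1 qs - alt_conf qs i + alt_conf (qs.set i.toNat j) i := by
  have hlen := len_set qs i.toNat j
  have h1 := cost_eq_sum qs
  have h2 := cost_eq_sum (qs.set i.toNat j)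
  rw [hlen] at h2
  have h3 := conf_eq_sum qs i
  have h4 := conf_eq_sum (qs.set i.toNat j) i
  rw [hlen] at h4
  have h5 := pair_sum_split qs i h0 hn
  have h6 := pair_sum_split (qs.set i.toNat j) i h0 (by rw [hlen]; exact hn)
  rw [hlen] at h6
  have hX : (∑ p ∈ Finset.Ico 0 (PySem.List.len qs), ∑ q ∈ Finset.Ico (p + 1) (PySem.List.len qs),
          (if p ≠ i ∧ q ≠ i then pairW (qs.set i.toNat j) p q else 0))
      = ∑ p ∈ Finset.Ico 0 (PySem.List.len qs), ∑ q ∈ Finset.Ico (p + 1) (PySem.List.len qs),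
          (if p ≠ i ∧ q ≠ i then pairW qs p q else 0) := by
    refine Finset.sum_congr rfl fun p hp => Finset.sum_congr rfl fun q hq => ?_
    obtain ⟨hp0, hpn⟩ := Finset.mem_Ico.mp hp
    obtain ⟨hq1, hqn⟩ := Finset.mem_Ico.mp hq
    by_cases hc : p ≠ i ∧ q ≠ i
    · rw [if_pos hc, if_pos hc, pairW_set_ne qs i j p q h0 hp0 hpn (by omega) hqn hc.1 hc.2]
    · rw [if_neg hc, if_neg hc]
  rw [h1, h2, h3, h4, h5, h6, hX]
  ring
-- B's _conf_at probes the moved board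
lemma confAt_eq (qs : List Int) (i j : Int) (h0 : 0 ≤ i) (hn : i < PySem.List.len qs) :
    alt_confAt qs i j = alt_conf (qs.set i.toNat j) i := by
  unfold alt_confAt alt_conf
  rw [len_set]
  refine PySem.List.foldl_congr_mem _ _ _ _ (fun c k hk => ?_)
  obtain ⟨hk0, hkn⟩ := (PySem.List.mem_pyRange_one).mp hk
  by_cases hki : k = i
  · simp [hki]
  · rw [getD_set_ne qs i j k h0 hk0 hkn hki, getD_set_self qs i j h0 hn]
-- B's slice-built board is the moved board
lemma slice_build (qs : List Int) (i j : Int) (h0 : 0 ≤ i) (hn : i < PySem.List.len qs) :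
    PySem.List.slice qs none (some i) ++ [j] ++ PySem.List.slice qs (some (i + 1)) none
      = qs.set i.toNat j := by
  rw [PySem.List.slice_to qs h0, PySem.List.slice_from qs (by omega : (0:Int) ≤ i + 1)]
  have h1 : (i + 1).toNat = i.toNat + 1 := by omega
  rw [h1, List.set_eq_take_cons_drop j (by rw [PySem.List.len_eq] at hn; omega)]
  simp
-- the body of min_enemy's fold
def faStep (current : List Int) (i : Int) (st : List Int × Int) (j : Int) : List Int × Int :=
  if PySem.List.pyGetD current i 0 ≠ j then
    (if enemy_cost1 (PySem.List.pySetD current i j) < st.2 then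
      (PySem.List.pySetD current i j, enemy_cost1 (PySem.List.pySetD current i j)) else st)
  else st


lemma faStep_upd (current : List Int) (i : Int) (st : List Int × Int) (j : Int)
    (hj : PySem.List.pyGetD current i 0 ≠ j)
    (hlt : enemy_cost1 (PySem.List.pySetD current i j) < st.2) :
    faStep current i st j
      = (PySem.List.pySetD current i j, enemy_cost1 (PySem.List.pySetD current i j)) := by
  simp [faStep, hj, hlt]

lemma faStep_keep (current : List Int) (i : Int) (st : List Int × Int) (j : Int)
    (h : PySem.List.pyGetD current i 0 = j ∨ ¬ enemy_cost1 (PySem.List.pySetD current i j) < st.2) :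
    faStep current i st j = st := by
  rcases h with h | h <;> simp [faStep, h]

lemma min_enemy_eq (current : List Int) (i : Int) :
    min_enemy current i
      = ((PySem.List.pyRange 0 (PySem.List.len current) 1).foldl (faStep current i)
          (current, enemy_cost1 current)).1 := rfl

-- fold invariant: second component is the cost of the first
lemma fa_cost (current : List Int) (i : Int) (js : List Int) (mc : List Int) (ne : Int)
    (h : ne = enemy_cost1 mc) :
    (js.foldl (faStep current i) (mc, ne)).2 = enemy_cost1 (js.foldl (faStep current i) (mc, ne)).1 := by
  induction js generalizing mc ne with
  | nil => simpa using h
  | cons j rest ih =>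
    rw [List.foldl_cons]
    by_cases hj : PySem.List.pyGetD current i 0 ≠ j
    · by_cases hlt : enemy_cost1 (PySem.List.pySetD current i j) < ne
      · rw [faStep_upd current i (mc, ne) j hj hlt]
        exact ih _ _ rfl
      · rw [faStep_keep current i (mc, ne) j (Or.inr hlt)]
        exact ih _ _ h
    · rw [faStep_keep current i (mc, ne) j (Or.inl (not_not.mp hj))]
      exact ih _ _ h

-- the fold's running minimum never increases, and if it stays, the board stays
lemma fa_le (current : List Int) (i : Int) (js : List Int) (mc : List Int) (ne : Int) :
    (js.foldl (faStep current i) (mc, ne)).2 ≤ ne ∧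
    ((js.foldl (faStep current i) (mc, ne)).2 = ne → (js.foldl (faStep current i) (mc, ne)).1 = mc) := by
  induction js generalizing mc ne with
  | nil => simp
  | cons j rest ih =>
    rw [List.foldl_cons]
    by_cases hj : PySem.List.pyGetD current i 0 ≠ j
    · by_cases hlt : enemy_cost1 (PySem.List.pySetD current i j) < ne
      · rw [faStep_upd current i (mc, ne) j hj hlt]
        obtain ⟨h1, _⟩ := ih (PySem.List.pySetD current i j)
          (enemy_cost1 (PySem.List.pySetD current i j))
        exact ⟨by omega, fun he => absurd he (by omega)⟩
      · rw [faStep_keep current i (mc, ne) j (Or.inr hlt)]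
        exact ih mc ne
    · rw [faStep_keep current i (mc, ne) j (Or.inl (not_not.mp hj))]
      exact ih mc ne

-- with running minimum 0 the fold is frozen
lemma fa_zero (current : List Int) (i : Int) (js : List Int) (mc : List Int) :
    js.foldl (faStep current i) (mc, 0) = (mc, 0) := by
  induction js with
  | nil => rfl
  | cons j rest ih =>
    rw [List.foldl_cons]
    by_cases hj : PySem.List.pyGetD current i 0 ≠ j
    · have hc : 0 ≤ enemy_cost1 (PySem.List.pySetD current i j) := cost_nonneg _
      rw [faStep_keep current i (mc, 0) j (Or.inr (by simpa using by omega))]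
      exact ih
    · rw [faStep_keep current i (mc, 0) j (Or.inl (not_not.mp hj))]
      exact ih


-- the c computed by B is the true cost of the moved board
lemma alt_c_eq (current : List Int) (i j : Int) (h0 : 0 ≤ i) (hn : i < PySem.List.len current) :
    alt_cost current - alt_conf current i + alt_confAt current i j
      = enemy_cost1 (current.set i.toNat j) := by
  rw [alt_cost_eq, confAt_eq current i j h0 hn, cost_set current i j h0 hn]

-- branch lemmas for one step of B's inner loop
lemma altInner_cons_skip (current : List Int) (i base old j : Int) (rest : List Int)
    (st : List Int × Int)
    (h : j = PySem.List.pyGetD current i 0 ∨ ¬ base - old + alt_confAt current i j < st.2) :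
    altInner current i base old (j :: rest) st = altInner current i base old rest st := by
  by_cases hj : j ≠ PySem.List.pyGetD current i 0
  · rcases h with h | h
    · exact absurd h hj
    · simp only [altInner]
      rw [if_pos hj, if_neg h]
  · simp only [altInner]
    rw [if_neg hj]

lemma altInner_cons_zero (current : List Int) (i base old j : Int) (rest : List Int)
    (st : List Int × Int)
    (hj : j ≠ PySem.List.pyGetD current i 0)
    (hlt : base - old + alt_confAt current i j < st.2)
    (hz : base - old + alt_confAt current i j = 0) :
    altInner current i base old (j :: rest) st
      = Sum.inl (PySem.List.slice current none (some i) ++ [j] ++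
          PySem.List.slice current (some (i + 1)) none) := by
  simp only [altInner]
  rw [if_pos hj, if_pos hlt, if_pos hz]

lemma altInner_cons_upd (current : List Int) (i base old j : Int) (rest : List Int)
    (st : List Int × Int)
    (hj : j ≠ PySem.List.pyGetD current i 0)
    (hlt : base - old + alt_confAt current i j < st.2)
    (hz : ¬ base - old + alt_confAt current i j = 0) :
    altInner current i base old (j :: rest) st
      = altInner current i base old rest
          (PySem.List.slice current none (some i) ++ [j] ++
            PySem.List.slice current (some (i + 1)) none,
           base - old + alt_confAt current i j) := by
  simp only [altInner]
  rw [if_pos hj, if_pos hlt, if_neg hz]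

-- B's inner loop is frozen at running minimum 0
lemma fb_zero (current : List Int) (i : Int) (h0 : 0 ≤ i) (hn : i < PySem.List.len current)
    (js : List Int) (b : List Int) :
    altInner current i (alt_cost current) (alt_conf current i) js (b, 0) = Sum.inr (b, 0) := by
  induction js with
  | nil => rfl
  | cons j rest ih =>
    rw [altInner_cons_skip current i (alt_cost current) (alt_conf current i) j rest (b, 0)
      (Or.inr (by
        have hc := alt_c_eq current i j h0 hn
        have := cost_nonneg (current.set i.toNat j)
        simp only [hc]
        omega))]
    exact ih

-- MAIN INNER CORRESPONDENCE
lemma inner_corr (current : List Int) (i : Int) (h0 : 0 ≤ i) (hn : i < PySem.List.len current)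
    (js : List Int) :
    ∀ (mc b b0 : List Int) (ne m m0 : Int),
    ne = enemy_cost1 mc → m = enemy_cost1 b → m = min m0 ne →
    (ne < m0 → b = mc) → (¬ ne < m0 → b = b0 ∧ m = m0) → 0 < m →
    (match altInner current i (alt_cost current) (alt_conf current i) js (b, m) with
     | Sum.inl v =>
        (js.foldl (faStep current i) (mc, ne)).2 = 0 ∧ (js.foldl (faStep current i) (mc, ne)).1 = v
     | Sum.inr (b', m') =>
        m' = enemy_cost1 b' ∧ m' = min m0 (js.foldl (faStep current i) (mc, ne)).2 ∧
        ((js.foldl (faStep current i) (mc, ne)).2 < m0 → b' = (js.foldl (faStep current i) (mc, ne)).1) ∧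
        (¬ (js.foldl (faStep current i) (mc, ne)).2 < m0 → b' = b0 ∧ m' = m0) ∧ 0 < m') := by
  induction js with
  | nil =>
    intro mc b b0 ne m m0 hne hm hmin h1 h2 hpos
    simp only [altInner, List.foldl_nil]
    exact ⟨hm, hmin, h1, h2, hpos⟩
  | cons j rest ih =>
    intro mc b b0 ne m m0 hne hm hmin h1 h2 hpos
    have hmle0 : m ≤ m0 := by rw [hmin]; exact min_le_left _ _
    have hmlene : m ≤ ne := by rw [hmin]; exact min_le_right _ _
    by_cases hj : j ≠ PySem.List.pyGetD current i 0
    · -- a genuine candidate move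
      have hsetD : PySem.List.pySetD current i j = current.set i.toNat j :=
        PySem.List.pySetD_of_nonneg current j h0
      have hcB : alt_cost current - alt_conf current i + alt_confAt current i j
          = enemy_cost1 (current.set i.toNat j) := alt_c_eq current i j h0 hn
      have hcA : enemy_cost1 (PySem.List.pySetD current i j)
          = enemy_cost1 (current.set i.toNat j) := by rw [hsetD]
      have hc0 : 0 ≤ enemy_cost1 (current.set i.toNat j) := cost_nonneg _
      have hbuild : PySem.List.slice current none (some i) ++ [j] ++
          PySem.List.slice current (some (i + 1)) none = current.set i.toNat j :=
        slice_build current i j h0 hn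
      by_cases hlt : enemy_cost1 (current.set i.toNat j) < m
      · -- B updates (and so does A, since m ≤ ne)
        have hltA : enemy_cost1 (PySem.List.pySetD current i j) < (mc, ne).2 := by
          rw [hcA]; show _ < ne; omega
        rw [List.foldl_cons, faStep_upd current i (mc, ne) j (Ne.symm hj) hltA, hsetD]
        by_cases hz : enemy_cost1 (current.set i.toNat j) = 0
        · rw [altInner_cons_zero current i _ _ j rest (b, m) hj (by rw [hcB]; exact hlt)
            (by rw [hcB]; exact hz), hbuild]
          rw [hz, fa_zero]
          exact ⟨rfl, rfl⟩
        · rw [altInner_cons_upd current i _ _ j rest (b, m) hj (by rw [hcB]; exact hlt)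
            (by rw [hcB]; exact hz), hbuild, hcB]
          exact ih (current.set i.toNat j) (current.set i.toNat j) b0
            (enemy_cost1 (current.set i.toNat j)) (enemy_cost1 (current.set i.toNat j)) m0
            rfl rfl (by rw [min_eq_right (show enemy_cost1 (current.set i.toNat j) ≤ m0 by omega)])
            (fun _ => rfl) (fun h => absurd (show enemy_cost1 (current.set i.toNat j) < m0 by omega) h)
            (by omega)
      · -- B keeps its state
        rw [altInner_cons_skip current i _ _ j rest (b, m) (Or.inr (by rw [hcB]; exact hlt))]
        by_cases hlt2 : enemy_cost1 (current.set i.toNat j) < ne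
        · -- A still updates its per-column candidate
          have hltA : enemy_cost1 (PySem.List.pySetD current i j) < (mc, ne).2 := by
            rw [hcA]; exact hlt2
          rw [List.foldl_cons, faStep_upd current i (mc, ne) j (Ne.symm hj) hltA, hsetD]
          rcases min_cases m0 ne with ⟨he, hle⟩ | ⟨he, hl⟩
          · rw [he] at hmin
            exact ih (current.set i.toNat j) b b0 (enemy_cost1 (current.set i.toNat j)) m m0 rfl hm
              (by rw [min_eq_left (show m0 ≤ enemy_cost1 (current.set i.toNat j) by omega)]; omega)
              (fun h => absurd h (by omega)) (fun _ => h2 (by omega)) hpos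
          · rw [he] at hmin; omega
        · -- A keeps too
          have hkA : PySem.List.pyGetD current i 0 = j ∨
              ¬ enemy_cost1 (PySem.List.pySetD current i j) < (mc, ne).2 :=
            Or.inr (by rw [hcA]; exact hlt2)
          rw [List.foldl_cons, faStep_keep current i (mc, ne) j hkA]
          exact ih mc b b0 ne m m0 hne hm hmin h1 h2 hpos
    · -- j is the current row of queen i: both sides skip
      rw [altInner_cons_skip current i _ _ j rest (b, m) (Or.inl (not_not.mp hj))]
      rw [List.foldl_cons, faStep_keep current i (mc, ne) j (Or.inl (not_not.mp hj).symm)]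
      exact ih mc b b0 ne m m0 hne hm hmin h1 h2 hpos

-- MAIN OUTER CORRESPONDENCE
lemma outer_corr (current : List Int) (is : List Int)
    (hb : ∀ i ∈ is, 0 ≤ i ∧ i < PySem.List.len current) :
    ∀ (b : List Int) (m : Int), m = enemy_cost1 b → 0 < m → m ≤ enemy_cost1 current →
    tbnLoop current is b (some m) = altOuter current (alt_cost current) is (b, m) := by
  induction is with
  | nil => intro b m _ _ _; rfl
  | cons i rest ih =>
    intro b m hm hpos hle
    obtain ⟨hi0, hin⟩ := hb i List.mem_cons_self
    have hb' : ∀ x ∈ rest, 0 ≤ x ∧ x < PySem.List.len current :=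
      fun x hx => hb x (List.mem_cons_of_mem i hx)
    have hcorr := inner_corr current i hi0 hin
      (PySem.List.pyRange 0 (PySem.List.len current) 1) current b b
      (enemy_cost1 current) m m rfl hm (by rw [min_eq_left hle])
      (fun h => absurd h (by omega)) (fun _ => ⟨rfl, rfl⟩) hpos
    have hF2 : ((PySem.List.pyRange 0 (PySem.List.len current) 1).foldl (faStep current i)
        (current, enemy_cost1 current)).2
        = enemy_cost1 ((PySem.List.pyRange 0 (PySem.List.len current) 1).foldl (faStep current i)
            (current, enemy_cost1 current)).1 :=
      fa_cost current i _ current (enemy_cost1 current) rfl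
    have hFle := fa_le current i (PySem.List.pyRange 0 (PySem.List.len current) 1)
      current (enemy_cost1 current)
    cases haI : altInner current i (alt_cost current) (alt_conf current i)
        (PySem.List.pyRange 0 (PySem.List.len current) 1) (b, m) with
    | inl v =>
      rw [haI] at hcorr
      obtain ⟨hz, hv⟩ := hcorr
      simp only [tbnLoop, altOuter, haI]
      rw [min_enemy_eq]
      rw [if_pos (by simp only [decide_eq_true_eq, ← hF2, hz]; omega : (decide
        (enemy_cost1 ((PySem.List.pyRange 0 (PySem.List.len current) 1).foldl (faStep current i)
          (current, enemy_cost1 current)).1 < m) = true))]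
      rw [if_pos (by rw [← hF2]; exact hz)]
      exact hv
    | inr st' =>
      obtain ⟨b', m'⟩ := st'
      rw [haI] at hcorr
      obtain ⟨hc1, hc2, hc3, hc4, hc5⟩ := hcorr
      simp only [tbnLoop, altOuter, haI]
      rw [min_enemy_eq]
      by_cases hlt : ((PySem.List.pyRange 0 (PySem.List.len current) 1).foldl (faStep current i)
          (current, enemy_cost1 current)).2 < m
      · rw [if_pos (by simp only [decide_eq_true_eq, ← hF2]; exact hlt)]
        have hm' : m' = ((PySem.List.pyRange 0 (PySem.List.len current) 1).foldl (faStep current i)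
            (current, enemy_cost1 current)).2 := by
          rw [hc2, min_eq_right (le_of_lt hlt)]
        rw [if_neg (by rw [← hF2]; omega)]
        rw [← hF2]
        rw [ih hb'
          ((PySem.List.pyRange 0 (PySem.List.len current) 1).foldl (faStep current i)
            (current, enemy_cost1 current)).1
          ((PySem.List.pyRange 0 (PySem.List.len current) 1).foldl (faStep current i)
            (current, enemy_cost1 current)).2
          hF2 (by omega) (by have := hFle.1; omega)]
        rw [hc3 hlt, hm']
      · rw [if_neg (by simp only [decide_eq_true_eq, ← hF2]; exact hlt)]
        obtain ⟨hb'', hm''⟩ := hc4 hlt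
        rw [hb'', hm'']
        exact ih hb' b m hm hpos hle

lemma altOuter_zero (current : List Int) (is : List Int)
    (hb : ∀ i ∈ is, 0 ≤ i ∧ i < PySem.List.len current) (b : List Int) :
    altOuter current (alt_cost current) is (b, 0) = b := by
  induction is with
  | nil => rfl
  | cons i rest ih =>
    obtain ⟨h0, hn⟩ := hb i List.mem_cons_self
    simp only [altOuter]
    rw [fb_zero current i h0 hn]
    exact ih (fun x hx => hb x (List.mem_cons_of_mem i hx))

theorem the_best_neighbor_eq (current : List Int) :
    the_best_neighbor current = the_best_neighbor_alt current := by
  rcases current with _ | ⟨x, xs⟩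
  · rfl
  · set current := x :: xs with hcur
    have hn : (0:Int) < PySem.List.len current := by
      simp [PySem.List.len_eq, hcur]
    have hrange : PySem.List.pyRange 0 (PySem.List.len current) 1
        = 0 :: PySem.List.pyRange 1 (PySem.List.len current) 1 := by
      have := PySem.List.pyRange_one_cons (a := 0) (b := PySem.List.len current) hn
      simpa using this
    have hb' : ∀ i ∈ PySem.List.pyRange 1 (PySem.List.len current) 1,
        0 ≤ i ∧ i < PySem.List.len current := by
      intro i hi
      have := PySem.List.mem_pyRange_one.mp hi
      omega
    unfold the_best_neighbor the_best_neighbor_alt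
    rw [hrange]
    by_cases hbase : enemy_cost1 current = 0
    · -- a zero-cost board: A returns current at column 0, B never updates
      simp only [tbnLoop, altOuter]
      rw [min_enemy_eq, hbase, fa_zero]
      have hIB : altInner current 0 (alt_cost current) (alt_conf current 0)
          (PySem.List.pyRange 0 (PySem.List.len current) 1) (current, alt_cost current)
          = Sum.inr (current, 0) := by
        rw [show (current, alt_cost current) = (current, (0:Int)) from by
          rw [show alt_cost current = 0 from hbase]]
        exact fb_zero current 0 le_rfl hn _ current
      rw [hIB]
      rw [if_pos (by trivial), if_pos (by simpa using hbase)]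
      exact (altOuter_zero current _ hb' current).symm
    · have hpos : 0 < enemy_cost1 current := lt_of_le_of_ne (cost_nonneg current) (Ne.symm hbase)
      have hcorr := inner_corr current 0 le_rfl hn
        (PySem.List.pyRange 0 (PySem.List.len current) 1) current current current
        (enemy_cost1 current) (enemy_cost1 current) (enemy_cost1 current) rfl rfl
        (min_self _).symm (fun h => absurd h (lt_irrefl _)) (fun _ => ⟨rfl, rfl⟩) hpos
      simp only [alt_cost_eq] at hcorr
      have hF2 : ((PySem.List.pyRange 0 (PySem.List.len current) 1).foldl (faStep current 0)
          (current, enemy_cost1 current)).2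
          = enemy_cost1 ((PySem.List.pyRange 0 (PySem.List.len current) 1).foldl (faStep current 0)
              (current, enemy_cost1 current)).1 :=
        fa_cost current 0 _ current (enemy_cost1 current) rfl
      have hFle := fa_le current 0 (PySem.List.pyRange 0 (PySem.List.len current) 1)
        current (enemy_cost1 current)
      cases haI : altInner current 0 (enemy_cost1 current) (alt_conf current 0)
          (PySem.List.pyRange 0 (PySem.List.len current) 1) (current, enemy_cost1 current) with
      | inl v =>
        rw [haI] at hcorr
        obtain ⟨hz, hv⟩ := hcorr
        simp only [tbnLoop, altOuter, alt_cost_eq]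
        rw [haI, min_enemy_eq]
        rw [if_pos (by trivial), if_pos (by rw [← hF2]; exact hz)]
        exact hv
      | inr st' =>
        obtain ⟨b', m'⟩ := st'
        rw [haI] at hcorr
        obtain ⟨hc1, hc2, hc3, hc4, hc5⟩ := hcorr
        simp only [tbnLoop, altOuter, alt_cost_eq]
        rw [haI, min_enemy_eq]
        rw [if_pos (by trivial)]
        have hFpos : 0 < ((PySem.List.pyRange 0 (PySem.List.len current) 1).foldl (faStep current 0)
            (current, enemy_cost1 current)).2 := by
          have h0le : 0 ≤ ((PySem.List.pyRange 0 (PySem.List.len current) 1).foldl (faStep current 0)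
              (current, enemy_cost1 current)).2 := by
            rw [hF2]; exact cost_nonneg _
          rcases min_cases (enemy_cost1 current)
            ((PySem.List.pyRange 0 (PySem.List.len current) 1).foldl (faStep current 0)
              (current, enemy_cost1 current)).2 with ⟨he, hle⟩ | ⟨he, hlt⟩ <;> omega
        rw [if_neg (by rw [← hF2]; omega), ← hF2]
        by_cases hlt : ((PySem.List.pyRange 0 (PySem.List.len current) 1).foldl (faStep current 0)
            (current, enemy_cost1 current)).2 < enemy_cost1 current
        · have hm' : m' = ((PySem.List.pyRange 0 (PySem.List.len current) 1).foldl (faStep current 0)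
              (current, enemy_cost1 current)).2 := by
            rw [hc2, min_eq_right (le_of_lt hlt)]
          rw [outer_corr current _ hb' _ _ hF2 hFpos (by have := hFle.1; omega)]
          simp only [alt_cost_eq]
          rw [hc3 hlt, hm']
        · obtain ⟨hb'', hm''⟩ := hc4 hlt
          have hFeq : ((PySem.List.pyRange 0 (PySem.List.len current) 1).foldl (faStep current 0)
              (current, enemy_cost1 current)).2 = enemy_cost1 current := by
            have := hFle.1; omega
          have hF1 : ((PySem.List.pyRange 0 (PySem.List.len current) 1).foldl (faStep current 0)
              (current, enemy_cost1 current)).1 = current := hFle.2 hFeq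
          rw [hF1, hFeq]
          rw [outer_corr current _ hb' current (enemy_cost1 current) rfl hpos le_rfl]
          simp only [alt_cost_eq]
          rw [hb'', hm'']

-- ===== VERDICT (by name: the statement is the Claim_ definition above) =====
theorem the_best_neighbor_spec : Claim_equal_the_best_neighbor := by
  intro current _
  unfold Spec_the_best_neighbor
  exact the_best_neighbor_eq current
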